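-- pv_equiv track=rewrite | github.com/davidfstr/Crystal-Web-Archiver | src/crystal/model/resource_group.py | literal_prefix_for_url_pattern
-- ===== SOURCE A (Python) =====
-- import math
--
-- def literal_prefix_for_url_pattern(url_pattern: str) -> str:
--     """
--     Returns the longest prefix of the specified url pattern that consists
--     only of literal characters, possibly the empty string.
--     """
--     first_meta_index = math.inf
--     for metachar in ['**', '*', '#', '@']:
--         cur_meta_index = url_pattern.find(metachar)
--         if cur_meta_index != -1 and cur_meta_index < first_meta_index:
--             first_meta_index = cur_meta_index
--     if first_meta_index == math.inf:
--         return url_pattern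
--     else:
--         assert isinstance(first_meta_index, int)
--         return url_pattern[:first_meta_index]
-- ===== SOURCE B (Python) =====
-- def literal_prefix_for_url_pattern(url_pattern: str) -> str:
--     """
--     Returns the longest prefix of the specified url pattern that consists
--     only of literal characters, possibly the empty string.
--     """
--     for i, ch in enumerate(url_pattern):
--         if ch in ('*', '#', '@'):
--             return url_pattern[:i]
--     return url_pattern
-- ===== Notes on version B (the rewrite author's own statement) =====
-- stated objective: simpler
-- what changed: Replaces four repeated str.find scans plus a running-minimum accumulator with a single left-to-right character scan that returns at the first metachar ('**' is dropped because the earliest '*' is always at or before the earliest '**').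
import Mathlib
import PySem

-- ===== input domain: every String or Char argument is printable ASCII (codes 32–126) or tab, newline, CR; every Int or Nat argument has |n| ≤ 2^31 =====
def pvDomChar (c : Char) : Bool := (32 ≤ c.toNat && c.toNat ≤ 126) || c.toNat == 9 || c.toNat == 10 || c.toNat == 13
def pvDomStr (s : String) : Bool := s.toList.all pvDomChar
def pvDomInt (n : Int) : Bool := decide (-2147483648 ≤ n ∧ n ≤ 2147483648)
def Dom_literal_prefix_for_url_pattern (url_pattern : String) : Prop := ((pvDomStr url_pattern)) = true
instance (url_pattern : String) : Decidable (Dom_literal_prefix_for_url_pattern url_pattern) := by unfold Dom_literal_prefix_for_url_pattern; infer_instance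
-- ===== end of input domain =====

-- B replaces A's four repeated str.find scans and running-minimum accumulator with a
-- single left-to-right scan returning at the first metachar ('**' is redundant): simpler.

-- ===== PORT A =====
-- A: for each metachar in ['**','*','#','@'] take url_pattern.find(metachar) and keep
-- the running minimum of the non-(-1) indices (math.inf start = Option.none), then
-- return url_pattern or url_pattern[:first_meta_index].
def literal_prefix_for_url_pattern (url_pattern : String) : String :=
  let fmi : Option Int :=
    ["**", "*", "#", "@"].foldl
      (fun (acc : Option Int) (metachar : String) =>
        let cur := PySem.Str.find url_pattern metachar
        if cur != -1 && (match acc with | none => true | some a => decide (cur < a)) then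
          some cur
        else acc)
      none
  match fmi with
  | none => url_pattern
  | some i => PySem.Str.slice url_pattern none (some i)

-- ===== PORT B =====
-- B: one pass; at the first character in {'*', '#', '@'} return the prefix scanned so
-- far, otherwise the whole string.
def pvIsMeta (c : Char) : Bool := c == '*' || c == '#' || c == '@'

def pvScan (cs : List Char) : List Char :=
  match cs with
  | [] => []
  | c :: rest => if pvIsMeta c then [] else c :: pvScan rest

def literal_prefix_for_url_pattern_alt (url_pattern : String) : String :=
  String.ofList (pvScan url_pattern.toList)

-- ===== PRECONDITION & SPEC =====
def Spec_literal_prefix_for_url_pattern (url_pattern : String) (out : String) : Prop := out = literal_prefix_for_url_pattern_alt url_pattern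
instance (url_pattern : String) (out : String) : Decidable (Spec_literal_prefix_for_url_pattern url_pattern out) := by unfold Spec_literal_prefix_for_url_pattern; infer_instance

-- ===== CLAIM (what is proved, stated in full; the proofs are below) =====
def Claim_equal_literal_prefix_for_url_pattern : Prop := ∀ (url_pattern : String), Dom_literal_prefix_for_url_pattern url_pattern → Spec_literal_prefix_for_url_pattern url_pattern (literal_prefix_for_url_pattern url_pattern)

-- ===== LEMMAS AND PROOFS =====

-- [c] is a prefix of l iff l starts with c
theorem pv_sing_prefix (c : Char) (l : List Char) : [c] <+: l ↔ l.head? = some c := by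
  constructor
  · rintro ⟨t, rfl⟩; rfl
  · intro h
    cases l with
    | nil => simp at h
    | cons a t => simp at h; exact ⟨t, by simp [h]⟩

-- [c] is infix of l iff c ∈ l
theorem pv_sing_infix (c : Char) (l : List Char) : [c] <:+: l ↔ c ∈ l := by
  constructor
  · intro h; exact h.mem (List.mem_singleton_self c)
  · intro h
    obtain ⟨l1, l2, rfl⟩ := List.append_of_mem h
    exact ⟨l1, l2, by simp⟩

-- single-char find: -1 iff absent
theorem pv_find_sing_neg (c : Char) (l : List Char) :
    PySem.Chars.find l [c] = -1 ↔ c ∉ l := by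
  rw [PySem.Chars.find_eq_neg_one_iff, pv_sing_infix]

-- single-char find spec (present case)
theorem pv_find_sing_spec (c : Char) (l : List Char) (h : c ∈ l) :
    0 ≤ PySem.Chars.find l [c] ∧
    l[(PySem.Chars.find l [c]).toNat]? = some c ∧
    ∀ i < (PySem.Chars.find l [c]).toNat, l[i]? ≠ some c := by
  have hnn : 0 ≤ PySem.Chars.find l [c] := by
    rw [PySem.Chars.find_nonneg_iff, pv_sing_infix]; exact h
  obtain ⟨h1, h2⟩ := PySem.Chars.find_spec (s := l) (sub := [c]) hnn
  refine ⟨hnn, ?_, ?_⟩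
  · rw [← List.head?_drop]; exact (pv_sing_prefix c _).mp h1
  · intro i hi hcontra
    exact h2 i hi ((pv_sing_prefix c _).mpr (by rw [List.head?_drop]; exact hcontra))

-- find "**": if it hits, a '*' sits at that index
theorem pv_find_dd (l : List Char) (h : PySem.Chars.find l ['*','*'] ≠ -1) :
    0 ≤ PySem.Chars.find l ['*','*'] ∧
    l[(PySem.Chars.find l ['*','*']).toNat]? = some '*' := by
  have hge := PySem.Chars.neg_one_le_find (s := l) (sub := ['*','*'])
  have hnn : 0 ≤ PySem.Chars.find l ['*','*'] := by omega
  obtain ⟨h1, _⟩ := PySem.Chars.find_spec (s := l) (sub := ['*','*']) hnn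
  obtain ⟨t, ht⟩ := h1
  refine ⟨hnn, ?_⟩
  rw [← List.head?_drop, ← ht]; rfl

-- first-star find is ≤ double-star find when the latter hits
theorem pv_star_le (l : List Char) (h : PySem.Chars.find l ['*','*'] ≠ -1) :
    PySem.Chars.find l ['*'] ≠ -1 ∧
    PySem.Chars.find l ['*'] ≤ PySem.Chars.find l ['*','*'] := by
  obtain ⟨hnn, hat⟩ := pv_find_dd l h
  have hmem : '*' ∈ l := List.mem_of_getElem? hat
  obtain ⟨hnn1, _, hmin⟩ := pv_find_sing_spec '*' l hmem
  refine ⟨fun heq => ((pv_find_sing_neg '*' l).mp heq) hmem, ?_⟩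
  by_contra hlt
  push_neg at hlt
  exact hmin _ (by omega) hat


-- B's scan keeps the whole string when no metachar occurs
theorem pv_scan_of_no_meta (l : List Char) (h : ∀ c ∈ l, pvIsMeta c = false) :
    pvScan l = l := by
  induction l with
  | nil => rfl
  | cons c t ih =>
    simp only [pvScan, h c (by simp)]
    simp [ih (fun x hx => h x (by simp [hx]))]

-- B's scan stops exactly at the first metachar
theorem pv_scan_take (l : List Char) (k : Nat) (hk : k < l.length)
    (hmeta : pvIsMeta (l[k]'hk) = true)
    (hpre : ∀ j (hj : j < k), pvIsMeta (l[j]'(by omega)) = false) :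
    pvScan l = l.take k := by
  induction l generalizing k with
  | nil => simp at hk
  | cons c t ih =>
    cases k with
    | zero => simp at hmeta; simp [pvScan, hmeta]
    | succ k' =>
      have hc : pvIsMeta c = false := hpre 0 (by omega)
      simp only [pvScan, hc, Bool.false_eq_true, if_false, List.take_succ_cons,
        List.cons.injEq, true_and]
      exact ih k' (by simpa using hk) (by simpa using hmeta)
        (fun j hj => by have := hpre (j+1) (by omega); simpa using this)

-- a metachar's find cannot land before the first metachar index
theorem pv_find_ge_k (l : List Char) (k : Nat) (c : Char) (hc : pvIsMeta c = true)
    (hpre : ∀ j < k, ∀ c', l[j]? = some c' → pvIsMeta c' = false)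
    (h : PySem.Chars.find l [c] ≠ -1) : (k : Int) ≤ PySem.Chars.find l [c] := by
  have hmem : c ∈ l := by
    by_contra hm; exact h ((pv_find_sing_neg c l).mpr hm)
  obtain ⟨hnn, hat, _⟩ := pv_find_sing_spec c l hmem
  by_contra hlt
  push_neg at hlt
  have hlt' : (PySem.Chars.find l [c]).toNat < k := by omega
  have := hpre _ hlt' c hat
  rw [hc] at this; cases this

-- the char standing at the first metachar index is found exactly there
theorem pv_find_eq_k (l : List Char) (k : Nat) (c : Char) (hc : pvIsMeta c = true)
    (hk : l[k]? = some c)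
    (hpre : ∀ j < k, ∀ c', l[j]? = some c' → pvIsMeta c' = false) :
    PySem.Chars.find l [c] = (k : Int) := by
  have hmem : c ∈ l := List.mem_of_getElem? hk
  obtain ⟨hnn, hat, hmin⟩ := pv_find_sing_spec c l hmem
  have hne : PySem.Chars.find l [c] ≠ -1 :=
    fun heq => ((pv_find_sing_neg c l).mp heq) hmem
  have hge := pv_find_ge_k l k c hc hpre hne
  have hle : ¬ (k < (PySem.Chars.find l [c]).toNat) := fun hlt => hmin k hlt hk
  omega

-- another metachar is found strictly after the first metachar index (if at all)
theorem pv_find_gt_k (l : List Char) (k : Nat) (c c' : Char) (hc : pvIsMeta c = true)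
    (hk : l[k]? = some c') (hcc : c ≠ c')
    (hpre : ∀ j < k, ∀ c'', l[j]? = some c'' → pvIsMeta c'' = false)
    (h : PySem.Chars.find l [c] ≠ -1) : (k : Int) < PySem.Chars.find l [c] := by
  have hge := pv_find_ge_k l k c hc hpre h
  have hmem : c ∈ l := by
    by_contra hm; exact h ((pv_find_sing_neg c l).mpr hm)
  obtain ⟨hnn, hat, _⟩ := pv_find_sing_spec c l hmem
  rcases eq_or_lt_of_le hge with heq | hlt
  · exfalso
    have : l[k]? = some c := by rw [show k = (PySem.Chars.find l [c]).toNat by omega]; exact hat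
    rw [this] at hk; exact hcc (by simpa using hk)
  · exact hlt

-- one step of A's running-minimum fold
def pvStep (acc : Option Int) (cur : Int) : Option Int :=
  if cur != -1 && (match acc with | none => true | some a => decide (cur < a)) then
    some cur
  else acc

-- pvStep facts
theorem pvStep_skip (acc : Option Int) : pvStep acc (-1) = acc := by
  cases acc <;> simp [pvStep]

theorem pvStep_none_ne (cur : Int) (h : cur ≠ -1) : pvStep none cur = some cur := by
  simp [pvStep, h]

theorem pvStep_some_ge (a cur : Int) (h : ¬ cur < a) : pvStep (some a) cur = some a := by
  simp [pvStep, h]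

theorem pvStep_some_lt (a cur : Int) (h : cur < a) (h2 : cur ≠ -1) :
    pvStep (some a) cur = some cur := by
  simp [pvStep, h, h2]

theorem pvStep_keep_k (k f : Int) (h : f = -1 ∨ k ≤ f) : pvStep (some k) f = some k := by
  rcases h with h | h
  · rw [h, pvStep_skip]
  · exact pvStep_some_ge k f (by omega)

-- abstract evaluation of A's four-step fold under the first-metachar facts
theorem pv_fold_eval (k f1 f2 f3 f4 : Int) (hk : 0 ≤ k)
    (h2 : f2 = k ∨ f2 = -1 ∨ k < f2)
    (h3 : f3 = k ∨ f3 = -1 ∨ k < f3)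
    (h4 : f4 = k ∨ f4 = -1 ∨ k < f4)
    (hsome : f2 = k ∨ f3 = k ∨ f4 = k)
    (hstar : f1 ≠ -1 → f2 ≠ -1 ∧ f2 ≤ f1) :
    pvStep (pvStep (pvStep (pvStep none f1) f2) f3) f4 = some k := by
  have hkne : (k : Int) ≠ -1 := by omega
  have ha2 : pvStep (pvStep none f1) f2 = if f2 = -1 then none else some f2 := by
    by_cases hf2 : f2 = -1
    · have hf1 : f1 = -1 := by
        by_contra hf1; exact (hstar hf1).1 hf2
      rw [hf1, hf2, pvStep_skip, pvStep_skip, if_pos rfl]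
    · rw [if_neg hf2]
      by_cases hf1 : f1 = -1
      · rw [hf1, pvStep_skip, pvStep_none_ne f2 hf2]
      · obtain ⟨_, hle⟩ := hstar hf1
        rcases lt_or_eq_of_le hle with hlt | heq
        · rw [pvStep_none_ne f1 hf1, pvStep_some_lt f1 f2 hlt hf2]
        · rw [pvStep_none_ne f1 hf1, pvStep_some_ge f1 f2 (by omega), heq]
  rw [ha2]
  by_cases hf2k : f2 = k
  · rw [if_neg (by omega), hf2k,
      pvStep_keep_k k f3 (by omega),
      pvStep_keep_k k f4 (by omega)]
  · have h2' : f2 = -1 ∨ k < f2 := by omega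
    by_cases hf3k : f3 = k
    · have ha3 : pvStep (if f2 = -1 then none else some f2) f3 = some k := by
        rcases h2' with h | h
        · rw [if_pos h, hf3k, pvStep_none_ne k hkne]
        · rw [if_neg (by omega), hf3k, pvStep_some_lt f2 k h hkne]
      rw [ha3, pvStep_keep_k k f4 (by omega)]
    · have h3' : f3 = -1 ∨ k < f3 := by omega
      have hf4k : f4 = k := by omega
      have ha3 : pvStep (if f2 = -1 then none else some f2) f3 = none ∨
          ∃ x, pvStep (if f2 = -1 then none else some f2) f3 = some x ∧ k < x := by
        rcases h2' with h | h <;> rcases h3' with h' | h'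
        · rw [if_pos h, h', pvStep_skip]; exact Or.inl rfl
        · rw [if_pos h, pvStep_none_ne f3 (by omega)]; exact Or.inr ⟨f3, rfl, h'⟩
        · rw [if_neg (by omega), h', pvStep_skip]; exact Or.inr ⟨f2, rfl, h⟩
        · rw [if_neg (by omega)]
          by_cases hlt : f3 < f2
          · rw [pvStep_some_lt f2 f3 hlt (by omega)]; exact Or.inr ⟨f3, rfl, h'⟩
          · rw [pvStep_some_ge f2 f3 hlt]; exact Or.inr ⟨f2, rfl, h⟩
      rcases ha3 with h | ⟨x, hx, hkx⟩
      · rw [h, hf4k, pvStep_none_ne k hkne]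
      · rw [hx, hf4k, pvStep_some_lt x k hkx hkne]

-- find of a single metachar is k, -1, or beyond k
theorem pv_tri (l : List Char) (k : Nat) (c₀ c : Char) (hc₀ : pvIsMeta c₀ = true)
    (hk : l[k]? = some c)
    (hpre : ∀ j < k, ∀ c', l[j]? = some c' → pvIsMeta c' = false) :
    PySem.Chars.find l [c₀] = (k : Int) ∨ PySem.Chars.find l [c₀] = -1 ∨
      (k : Int) < PySem.Chars.find l [c₀] := by
  by_cases hc : c₀ = c
  · subst hc; exact Or.inl (pv_find_eq_k l k c₀ hc₀ hk hpre)
  · by_cases hne : PySem.Chars.find l [c₀] = -1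
    · exact Or.inr (Or.inl hne)
    · exact Or.inr (Or.inr (pv_find_gt_k l k c₀ c hc₀ hk hc hpre hne))

-- the two ports agree on every string
theorem pv_main (s : String) :
    literal_prefix_for_url_pattern s = literal_prefix_for_url_pattern_alt s := by
  unfold literal_prefix_for_url_pattern literal_prefix_for_url_pattern_alt
  cases hfi : s.toList.findIdx? pvIsMeta with
  | none =>
    have hall := List.findIdx?_eq_none_iff.mp hfi
    have hns : '*' ∉ s.toList := fun hm => by have := hall _ hm; simp [pvIsMeta] at this
    have hnh : '#' ∉ s.toList := fun hm => by have := hall _ hm; simp [pvIsMeta] at this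
    have hna : '@' ∉ s.toList := fun hm => by have := hall _ hm; simp [pvIsMeta] at this
    have e2 : PySem.Chars.find s.toList ['*'] = -1 := (pv_find_sing_neg _ _).mpr hns
    have e3 : PySem.Chars.find s.toList ['#'] = -1 := (pv_find_sing_neg _ _).mpr hnh
    have e4 : PySem.Chars.find s.toList ['@'] = -1 := (pv_find_sing_neg _ _).mpr hna
    have e1 : PySem.Chars.find s.toList ['*','*'] = -1 := by
      by_contra h; exact (pv_star_le s.toList h).1 e2
    have hfold : (["**", "*", "#", "@"].foldl
        (fun (acc : Option Int) (metachar : String) =>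
          let cur := PySem.Str.find s metachar
          if cur != -1 && (match acc with | none => true | some a => decide (cur < a)) then
            some cur
          else acc) none) = none := by
      show pvStep (pvStep (pvStep (pvStep none (PySem.Str.find s "**"))
        (PySem.Str.find s "*")) (PySem.Str.find s "#")) (PySem.Str.find s "@") = none
      have b1 : PySem.Str.find s "**" = PySem.Chars.find s.toList ['*','*'] := by simp
      have b2 : PySem.Str.find s "*" = PySem.Chars.find s.toList ['*'] := by simp
      have b3 : PySem.Str.find s "#" = PySem.Chars.find s.toList ['#'] := by simp
      have b4 : PySem.Str.find s "@" = PySem.Chars.find s.toList ['@'] := by simp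
      rw [b1, b2, b3, b4, e1, e2, e3, e4, pvStep_skip, pvStep_skip, pvStep_skip, pvStep_skip]
    simp only [hfold]
    rw [pv_scan_of_no_meta s.toList hall, String.ofList_toList]
  | some k =>
    obtain ⟨hk, hmeta, hprev⟩ := List.findIdx?_eq_some_iff_getElem.mp hfi
    have hkopt : s.toList[k]? = some (s.toList[k]'hk) := List.getElem?_eq_getElem hk
    have hpre : ∀ j < k, ∀ c', s.toList[j]? = some c' → pvIsMeta c' = false := by
      intro j hj c' hc'
      have hjlen : j < s.toList.length := by omega
      rw [List.getElem?_eq_getElem hjlen] at hc'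
      obtain rfl := (Option.some.inj hc').symm
      simpa using hprev j hj
    have hstar : PySem.Chars.find s.toList ['*','*'] ≠ -1 →
        PySem.Chars.find s.toList ['*'] ≠ -1 ∧
        PySem.Chars.find s.toList ['*'] ≤ PySem.Chars.find s.toList ['*','*'] :=
      pv_star_le s.toList
    have h2 := pv_tri s.toList k '*' _ (by decide) hkopt hpre
    have h3 := pv_tri s.toList k '#' _ (by decide) hkopt hpre
    have h4 := pv_tri s.toList k '@' _ (by decide) hkopt hpre
    have hsome : PySem.Chars.find s.toList ['*'] = (k : Int) ∨
        PySem.Chars.find s.toList ['#'] = (k : Int) ∨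
        PySem.Chars.find s.toList ['@'] = (k : Int) := by
      have hm := hmeta
      simp only [pvIsMeta, Bool.or_eq_true, beq_iff_eq] at hm
      rcases hm with (hm | hm) | hm
      · exact Or.inl (pv_find_eq_k s.toList k '*' (by decide) (by rw [hkopt, hm]) hpre)
      · exact Or.inr (Or.inl (pv_find_eq_k s.toList k '#' (by decide) (by rw [hkopt, hm]) hpre))
      · exact Or.inr (Or.inr (pv_find_eq_k s.toList k '@' (by decide) (by rw [hkopt, hm]) hpre))
    have hfold : (["**", "*", "#", "@"].foldl
        (fun (acc : Option Int) (metachar : String) =>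
          let cur := PySem.Str.find s metachar
          if cur != -1 && (match acc with | none => true | some a => decide (cur < a)) then
            some cur
          else acc) none) = some (k : Int) := by
      show pvStep (pvStep (pvStep (pvStep none (PySem.Str.find s "**"))
        (PySem.Str.find s "*")) (PySem.Str.find s "#")) (PySem.Str.find s "@") = some (k : Int)
      have b1 : PySem.Str.find s "**" = PySem.Chars.find s.toList ['*','*'] := by simp
      have b2 : PySem.Str.find s "*" = PySem.Chars.find s.toList ['*'] := by simp
      have b3 : PySem.Str.find s "#" = PySem.Chars.find s.toList ['#'] := by simp
      have b4 : PySem.Str.find s "@" = PySem.Chars.find s.toList ['@'] := by simp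
      rw [b1, b2, b3, b4]
      exact pv_fold_eval (k : Int) _ _ _ _ (by omega) h2 h3 h4 hsome hstar
    simp only [hfold]
    rw [pv_scan_take s.toList k hk hmeta
      (fun j hj => by
        have hjlen : j < s.toList.length := by omega
        have := hpre j hj (s.toList[j]'hjlen) (List.getElem?_eq_getElem hjlen)
        exact this)]
    apply String.toList_inj.mp
    rw [String.toList_ofList]
    simp only [PySem.Str.toList_slice, PySem.Chars.slice_eq_listSlice]
    rw [PySem.List.slice_to _ (by omega : (0:Int) ≤ (k:Int))]
    simp

-- ===== VERDICT (by name: the statement is the Claim_ definition above) =====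
theorem literal_prefix_for_url_pattern_spec : Claim_equal_literal_prefix_for_url_pattern := by
  intro url_pattern _
  simpa [Spec_literal_prefix_for_url_pattern] using pv_main url_pattern
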